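-- pv_equiv track=rewrite | github.com/stevenjwoods/Advent-of-Code-2018 | day12_subterranean_sustainability/functions.py | extend_string
-- ===== SOURCE A (Python) =====
-- def extend_string(string, zeroth, target, adjunct):
--     for i in range(2):
--         position = 0
--         for item in string:
--             if item == target:
--                 while len(string[:position]) < 5:
--                     string = adjunct + string
--                     if i is 0:
--                         zeroth += 1
--                     position += 1
--                 break
--             position += 1
--         string = string[::-1]
--         i += 1
--     return string, zeroth
-- ===== SOURCE B (Python) =====
-- def extend_string(string, zeroth, target, adjunct):
--     hits = [i for i, c in enumerate(string) if c == target]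
--     if hits:
--         n = max(0, 5 - hits[0])
--         m = max(0, 5 - (len(string) - 1 - hits[-1]))
--         string = adjunct * n + string + adjunct[::-1] * m
--         zeroth += n
--     return string, zeroth
-- ===== Notes on version B (the rewrite author's own statement) =====
-- stated objective: simpler
-- what changed: A makes two mirrored char-by-char scans with an inner while loop that prepends one copy of adjunct at a time and reverses the string twice; B does one enumerate scan collecting the match indices and assembles the result in closed form as adjunct*n + string + adjunct[::-1]*m (Pre_ excludes only the inputs where A's while loop never terminates: empty adjunct, string shorter than 5 containing the target char).
import Mathlib
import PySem

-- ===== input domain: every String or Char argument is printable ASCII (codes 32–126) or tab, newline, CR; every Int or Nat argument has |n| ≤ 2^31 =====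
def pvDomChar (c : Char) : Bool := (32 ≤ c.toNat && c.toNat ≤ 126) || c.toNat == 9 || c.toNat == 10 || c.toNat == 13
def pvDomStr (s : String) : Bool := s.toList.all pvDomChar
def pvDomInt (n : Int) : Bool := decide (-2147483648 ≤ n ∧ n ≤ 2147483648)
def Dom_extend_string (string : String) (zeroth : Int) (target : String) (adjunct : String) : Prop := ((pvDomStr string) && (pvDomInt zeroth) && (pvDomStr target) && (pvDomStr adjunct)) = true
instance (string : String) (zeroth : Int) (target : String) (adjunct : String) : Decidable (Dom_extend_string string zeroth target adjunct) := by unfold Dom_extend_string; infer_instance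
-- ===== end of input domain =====

-- B replaces A's two mirrored scans + inner prepend-while + double reversal by one
-- index-collecting scan and a closed-form assembly (objective: simpler).


-- ===== PORT A =====
-- inner 'while len(string[:position]) < 5' loop; fuel-indexed because Python's loop
-- diverges for empty adjunct on a short string with a target hit (excluded by Pre_);
-- on every input Pre_ admits the loop runs at most 5 iterations, so fuel 5 is exact.
def pvWhileA (a : List Char) (i : Nat) : Nat → List Char → Nat → Int → List Char × Nat × Int
  | 0, s, p, z => (s, p, z)
  | fuel+1, s, p, z =>
    if (List.take p s).length < 5 then
      pvWhileA a i fuel (a ++ s) (p+1) (if i = 0 then z + 1 else z)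
    else (s, p, z)

-- 'for item in string' over the snapshot cs, with running position p; on the first
-- item == target it runs the while loop and breaks.
def pvForA (t : String) (a : List Char) (i : Nat) : List Char → List Char → Nat → Int → List Char × Int
  | [], s, _, z => (s, z)
  | c :: cs, s, p, z =>
    if String.ofList [c] = t then
      let r := pvWhileA a i 5 s p z
      (r.1, r.2.2)
    else pvForA t a i cs s (p+1) z

def extend_string (string : String) (zeroth : Int) (target : String) (adjunct : String) : String × Int :=
  -- for i in range(2), unrolled: i = 0 then i = 1; string = string[::-1] after each pass
  let s0 := string.toList
  let r1 := pvForA target adjunct.toList 0 s0 s0 0 zeroth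
  let s1 := r1.1.reverse
  let r2 := pvForA target adjunct.toList 1 s1 s1 0 r1.2
  (String.ofList r2.1.reverse, r2.2)

-- ===== PORT B =====
def extend_string_alt (string : String) (zeroth : Int) (target : String) (adjunct : String) : String × Int :=
  -- zeroth is returned unchanged when there is no hit
  let hits := ((PySem.List.enumerate string.toList).filter (fun ic => String.ofList [ic.2] = target)).map (·.1)
  match hits.head?, hits.getLast? with
  | some f, some l =>
    let n : Int := max 0 (5 - f)
    let m : Int := max 0 (5 - ((string.toList.length : Int) - 1 - l))
    (String.ofList (PySem.List.pyRepeat adjunct.toList n ++ string.toList ++ PySem.List.pyRepeat adjunct.toList.reverse m), zeroth + n)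
  | _, _ => (string, zeroth)

-- ===== PRECONDITION & SPEC =====
-- Pre_ excludes exactly the inputs where Python A never returns (infinite while loop):
-- empty adjunct together with a string shorter than 5 that contains the target char.
def Pre_extend_string (string : String) (zeroth : Int) (target : String) (adjunct : String) : Prop :=
  adjunct ≠ "" ∨ 5 ≤ string.toList.length ∨ ∀ c ∈ string.toList, String.ofList [c] ≠ target
instance (string : String) (zeroth : Int) (target : String) (adjunct : String) : Decidable (Pre_extend_string string zeroth target adjunct) := by unfold Pre_extend_string; infer_instance

def pvWitness_extend_string : String × Int × String × String := ("ab#a", 3, "#", "xy")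

def Spec_extend_string (string : String) (zeroth : Int) (target : String) (adjunct : String) (out : String × Int) : Prop := out = extend_string_alt string zeroth target adjunct
instance (string : String) (zeroth : Int) (target : String) (adjunct : String) (out : String × Int) : Decidable (Spec_extend_string string zeroth target adjunct out) := by unfold Spec_extend_string; infer_instance

-- ===== CLAIM (what is proved, stated in full; the proofs are below) =====
def Claim_equal_extend_string : Prop := ∀ (string : String) (zeroth : Int) (target : String) (adjunct : String), Dom_extend_string string zeroth target adjunct → Pre_extend_string string zeroth target adjunct → Spec_extend_string string zeroth target adjunct (extend_string string zeroth target adjunct)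

-- ===== LEMMAS AND PROOFS =====

-- the Bool form of the hit test, shared by findIdx? statements
def hitB (t : String) (c : Char) : Bool := decide (String.ofList [c] = t)

-- flatten (replicate k x) manipulation
theorem flatRep_succ' (k : Nat) (x : List Char) :
    (List.replicate (k+1) x).flatten = (List.replicate k x).flatten ++ x := by
  rw [List.replicate_succ']; simp

theorem flatRep_reverse (k : Nat) (x : List Char) :
    ((List.replicate k x).flatten).reverse = (List.replicate k x.reverse).flatten := by
  induction k with
  | zero => simp
  | succ k ih => rw [flatRep_succ', List.reverse_append, ih, List.replicate_succ]; simp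

theorem whileA_eq (a : List Char) (i : Nat) :
    ∀ (fuel : Nat) (s : List Char) (p : Nat) (z : Int), p ≤ s.length →
      (1 ≤ a.length ∨ 5 ≤ s.length) → 5 - p ≤ fuel →
      pvWhileA a i fuel s p z =
        ((List.replicate (5-p) a).flatten ++ s, p + (5-p),
          if i = 0 then z + ((5-p : Nat) : Int) else z) := by
  intro fuel
  induction fuel with
  | zero =>
    intro s p z hp _ hf
    have hp5 : 5 ≤ p := by omega
    simp [pvWhileA, Nat.sub_eq_zero_of_le hp5]
  | succ fuel ih =>
    intro s p z hp ha hf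
    by_cases h5 : p < 5
    · have hcond : (List.take p s).length < 5 := by
        simp [List.length_take]; omega
      rw [pvWhileA, if_pos hcond]
      rw [ih (a ++ s) (p+1) (if i = 0 then z + 1 else z) (by simp; omega)
          (by rcases ha with h | h
              · exact Or.inl h
              · right; simp; omega) (by omega)]
      have hrep : (List.replicate (5-(p+1)) a).flatten ++ (a ++ s)
          = (List.replicate (5-p) a).flatten ++ s := by
        have h51 : 5 - p = (5 - (p+1)) + 1 := by omega
        rw [h51, List.replicate_succ']
        simp
      have h2 : p + 1 + (5 - (p+1)) = p + (5-p) := by omega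
      have h3 : (if i = 0 then (if i = 0 then z + 1 else z) + ((5-(p+1) : Nat) : Int) else (if i = 0 then z + 1 else z)) = if i = 0 then z + ((5-p : Nat) : Int) else z := by
        by_cases hi : i = 0 <;> simp [hi] <;> omega
      rw [hrep, h2, ← h3]
    · have hcond : ¬ (List.take p s).length < 5 := by
        simp [List.length_take]; omega
      rw [pvWhileA, if_neg hcond]
      have h50 : 5 - p = 0 := by omega
      simp [h50]

theorem forA_none (t : String) (a : List Char) (i : Nat) :
    ∀ (cs s : List Char) (p : Nat) (z : Int),
      List.findIdx? (hitB t) cs = none → pvForA t a i cs s p z = (s, z) := by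
  intro cs
  induction cs with
  | nil => intro s p z _; rfl
  | cons c cs ih =>
    intro s p z h
    rw [List.findIdx?_eq_none_iff] at h
    have hc : ¬ String.ofList [c] = t := by
      have := h c (by simp); simpa [hitB] using this
    rw [pvForA, if_neg hc]
    apply ih
    rw [List.findIdx?_eq_none_iff]
    intro x hx; exact h x (by simp [hx])

theorem forA_some (t : String) (a : List Char) (i : Nat) :
    ∀ (cs s : List Char) (p : Nat) (z : Int) (j : Nat),
      s.length = p + cs.length → (1 ≤ a.length ∨ 5 ≤ s.length) →
      List.findIdx? (hitB t) cs = some j →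
      pvForA t a i cs s p z =
        ((List.replicate (5-(p+j)) a).flatten ++ s,
          if i = 0 then z + ((5-(p+j) : Nat) : Int) else z) := by
  intro cs
  induction cs with
  | nil => intro s p z j _ _ h; simp at h
  | cons c cs ih =>
    intro s p z j hlen ha h
    rw [List.findIdx?_cons] at h
    by_cases hc : String.ofList [c] = t
    · simp [hitB, hc] at h
      subst h
      rw [pvForA, if_pos hc]
      rw [whileA_eq a i 5 s p z (by omega) ha (by omega)]
      simp
    · simp [hitB, hc] at h
      obtain ⟨j', hj', rfl⟩ := h
      rw [pvForA, if_neg hc]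
      rw [ih s (p+1) z j' (by simp at hlen ⊢; omega) ha hj']
      have h1 : p + 1 + j' = p + (j' + 1) := by omega
      rw [h1]

-- hit-index list of B, with a running Int offset (matching enumerate's indices)
def natHits (t : String) : List Char → Int → List Int
  | [], _ => []
  | c :: cs, k => if String.ofList [c] = t then k :: natHits t cs (k+1) else natHits t cs (k+1)

theorem natHits_eq_filterEnum (t : String) :
    ∀ (l : List Char) (k : Int),
      ((PySem.List.enumerate l k).filter (fun ic => String.ofList [ic.2] = t)).map (·.1)
        = natHits t l k := by
  intro l
  induction l with
  | nil => intro k; simp [PySem.List.enumerate_nil, natHits]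
  | cons c cs ih =>
    intro k
    rw [PySem.List.enumerate_cons]
    by_cases hc : String.ofList [c] = t <;>
      simp [natHits, hc, ih (k+1)]

theorem natHits_head? (t : String) :
    ∀ (l : List Char) (k : Int),
      (natHits t l k).head? = (List.findIdx? (hitB t) l).map (fun j => k + (j : Int)) := by
  intro l
  induction l with
  | nil => intro k; simp [natHits]
  | cons c cs ih =>
    intro k
    rw [List.findIdx?_cons]
    by_cases hc : String.ofList [c] = t
    · simp [natHits, hc, hitB]
    · rw [natHits, if_neg hc, ih (k+1)]
      have hb : hitB t c = false := by simp [hitB, hc]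
      rw [hb]
      simp only [Bool.false_eq_true, if_false]
      cases List.findIdx? (hitB t) cs <;> simp
      omega

theorem natHits_append (t : String) :
    ∀ (l1 l2 : List Char) (k : Int),
      natHits t (l1 ++ l2) k = natHits t l1 k ++ natHits t l2 (k + (l1.length : Int)) := by
  intro l1
  induction l1 with
  | nil => intro l2 k; simp [natHits]
  | cons c cs ih =>
    intro l2 k
    have h1 : k + 1 + (cs.length : Int) = k + ((cs.length + 1 : Nat) : Int) := by push_cast; ring
    by_cases hc : String.ofList [c] = t <;>
      simp [natHits, hc, ih l2 (k+1), h1]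

theorem natHits_getLast? (t : String) :
    ∀ (l : List Char) (k : Int),
      (natHits t l k).getLast?
        = (List.findIdx? (hitB t) l.reverse).map (fun j => k + (l.length : Int) - 1 - (j : Int)) := by
  intro l
  induction l using List.reverseRecOn with
  | nil => simp [natHits]
  | append_singleton l x ih =>
    intro k
    rw [natHits_append, List.reverse_append]
    simp only [List.reverse_singleton, List.singleton_append, List.findIdx?_cons]
    by_cases hc : String.ofList [x] = t
    · simp [natHits, hc, hitB]
      omega
    · have hb : hitB t x = false := by simp [hitB, hc]
      rw [hb]
      simp only [natHits, if_neg hc, Bool.false_eq_true, if_false, List.append_nil, ih k]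
      cases List.findIdx? (hitB t) l.reverse <;> simp
      ring

-- findIdx? facts used below
theorem findIdx?_append_left {p : Char → Bool} {xs : List Char} (ys : List Char) {j : Nat}
    (h : List.findIdx? p xs = some j) : List.findIdx? p (xs ++ ys) = some j := by
  simp [List.findIdx?_append, h]

theorem findIdx?_lt_length {p : Char → Bool} {xs : List Char} {j : Nat}
    (h : List.findIdx? p xs = some j) : j < xs.length :=
  (List.findIdx?_eq_some_iff_findIdx_eq.mp h).1

theorem findIdx?_mem {p : Char → Bool} {xs : List Char} {j : Nat}
    (h : List.findIdx? p xs = some j) : ∃ x ∈ xs, p x = true := by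
  have h1 := findIdx?_lt_length h
  have h2 := List.findIdx?_eq_some_iff_getElem.mp h
  exact ⟨xs[j]'h1, List.getElem_mem _, by tauto⟩

theorem findIdx?_reverse_isSome {p : Char → Bool} {xs : List Char} {j : Nat}
    (h : List.findIdx? p xs = some j) : ∃ j2, List.findIdx? p xs.reverse = some j2 := by
  cases hr : List.findIdx? p xs.reverse with
  | some j2 => exact ⟨j2, rfl⟩
  | none =>
    obtain ⟨x, hx, hpx⟩ := findIdx?_mem h
    have := List.findIdx?_eq_none_iff.mp hr x (by simpa using hx)
    simp [hpx] at this

-- ===== VERDICT pieces =====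
theorem extend_string_spec : Claim_equal_extend_string := by
  intro string zeroth target adjunct _hdom hpre
  show _ = _
  simp only [extend_string, extend_string_alt]
  set l := string.toList with hl
  set a := adjunct.toList with hadj
  have hhits : ((PySem.List.enumerate l).filter (fun ic => String.ofList [ic.2] = target)).map (·.1)
      = natHits target l 0 := natHits_eq_filterEnum target l 0
  cases hfind : List.findIdx? (hitB target) l with
  | none =>
    -- no hit at all: A reverses twice, B takes the fallback arm
    have hnorev : List.findIdx? (hitB target) l.reverse = none := by
      rw [List.findIdx?_eq_none_iff] at hfind ⊢
      intro x hx; exact hfind x (by simpa using hx)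
    rw [forA_none target a 0 l l 0 zeroth hfind]
    rw [forA_none target a 1 l.reverse l.reverse 0 zeroth hnorev]
    have hhead : (natHits target l 0).head? = none := by
      simp [natHits_head? target l 0, hfind]
    rw [hhits, hhead]
    simp [List.reverse_reverse, hl, String.ofList_toList]
  | some j =>
    -- hit at first index j; Pre_ supplies the while-loop side condition
    have hmem : ∃ c ∈ l, String.ofList [c] = target := by
      obtain ⟨x, hx, hpx⟩ := findIdx?_mem hfind
      exact ⟨x, hx, by simpa [hitB] using hpx⟩
    have ha5 : 1 ≤ a.length ∨ 5 ≤ l.length := by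
      rcases hpre with h | h | h
      · left
        have hne : adjunct.toList ≠ [] := by simpa using h
        have hane : a ≠ [] := by rw [hadj]; exact hne
        have := List.length_pos_of_ne_nil hane
        omega
      · right; exact h
      · obtain ⟨c, hc, hct⟩ := hmem; exact absurd hct (h c hc)
    obtain ⟨j2, hfind2⟩ := findIdx?_reverse_isSome hfind
    have hj : j < l.length := findIdx?_lt_length hfind
    have hj2 : j2 < l.length := by simpa using findIdx?_lt_length hfind2
    -- pass 1
    rw [forA_some target a 0 l l 0 zeroth j (by simp) ha5 hfind]
    simp only [Nat.zero_add, reduceIte]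
    -- pass 2
    have hfindS1 : List.findIdx? (hitB target)
        (((List.replicate (5-j) a).flatten ++ l).reverse) = some j2 := by
      rw [List.reverse_append]; exact findIdx?_append_left _ hfind2
    have ha5' : 1 ≤ a.length ∨ 5 ≤ (((List.replicate (5-j) a).flatten ++ l).reverse).length := by
      rcases ha5 with h | h
      · left; exact h
      · right; simp; omega
    rw [forA_some target a 1 _ _ 0 (zeroth + ((5-j : Nat) : Int)) j2 (by simp) ha5' hfindS1]
    simp only [Nat.zero_add]
    -- B side scrutinees
    have hhead : (natHits target l 0).head? = some ((j : Nat) : Int) := by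
      simp [natHits_head? target l 0, hfind]
    have hlast : (natHits target l 0).getLast? = some (((l.length : Nat) : Int) - 1 - ((j2 : Nat) : Int)) := by
      simp [natHits_getLast? target l 0, hfind2]
    rw [hhits, hhead, hlast]
    -- closed-form copies of adjunct
    have hpy1 : PySem.List.pyRepeat a (max 0 (5 - ((j : Nat) : Int))) = (List.replicate (5-j) a).flatten := by
      simp only [PySem.List.pyRepeat]
      congr 2
      omega
    have hpy2 : PySem.List.pyRepeat a.reverse
        (max 0 (5 - (((l.length : Nat) : Int) - 1 - (((l.length : Nat) : Int) - 1 - ((j2 : Nat) : Int)))))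
          = (List.replicate (5-j2) a.reverse).flatten := by
      simp only [PySem.List.pyRepeat]
      congr 2
      omega
    have hrev : ((List.replicate (5-j2) a).flatten ++ (((List.replicate (5-j) a).flatten ++ l).reverse)).reverse
        = (List.replicate (5-j) a).flatten ++ l ++ (List.replicate (5-j2) a.reverse).flatten := by
      rw [List.reverse_append, List.reverse_reverse, flatRep_reverse]
    have hz : zeroth + ((5-j : Nat) : Int) = zeroth + max 0 (5 - ((j : Nat) : Int)) := by omega
    simp only [hpy1, hpy2, hrev, hz]
    simp
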